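-- pv_equiv track=rewrite | github.com/01HARSHIT1/dailydose | basic_dsa_twenty_seven.py | is_odious_number_bitwise
-- ===== SOURCE A (Python) =====
-- def is_odious_number_bitwise(n):
--     """
--     Check if a number is Odious number using bitwise operations
--     Time Complexity: O(log n)
--     Space Complexity: O(1)
--     """
--     if n < 0:
--         n = abs(n)
--
--     count = 0
--     while n > 0:
--         count += n & 1  # Check if last bit is 1
--         n >>= 1  # Right shift
--
--     return count % 2 == 1
-- ===== SOURCE B (Python) =====
-- def is_odious_number_bitwise(n):
--     """Odious check by XOR-folding the top half of the bits onto the bottom half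
--     until a single bit remains; that bit is the parity of the popcount."""
--     n = abs(n)
--     w = n.bit_length()
--     while w > 1:
--         h = (w + 1) // 2
--         n = (n >> h) ^ (n & ((1 << h) - 1))
--         w = h
--     return n == 1
-- ===== Notes on version B (the rewrite author's own statement) =====
-- stated objective: alternative
-- what changed: Replaces the count-each-bit shift loop with XOR-folding the top half of the bits onto the bottom half until a single bit remains, whose value is the popcount's parity; no counter is kept at all.
import Mathlib
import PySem

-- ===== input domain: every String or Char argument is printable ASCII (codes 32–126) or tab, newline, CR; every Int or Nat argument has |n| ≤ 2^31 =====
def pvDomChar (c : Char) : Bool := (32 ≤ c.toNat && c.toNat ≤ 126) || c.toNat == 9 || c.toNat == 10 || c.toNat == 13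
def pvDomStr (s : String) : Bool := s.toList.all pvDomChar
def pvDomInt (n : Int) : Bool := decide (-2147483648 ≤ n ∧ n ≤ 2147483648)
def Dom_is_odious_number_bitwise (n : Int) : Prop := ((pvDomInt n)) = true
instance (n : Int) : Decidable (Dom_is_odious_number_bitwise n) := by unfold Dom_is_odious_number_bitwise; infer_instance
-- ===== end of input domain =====

-- B replaces A's one-iteration-per-bit counting loop by XOR-folding the top half of
-- the bits onto the bottom half until one bit remains (that bit is the popcount's
-- parity); return-value equivalence is proved for all Int inputs.

-- ===== PORT A =====
-- A's while loop: count += n & 1; n >>= 1.  After the abs-fold the value is a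
-- nonnegative integer, modelled exactly by Nat (>>> 1 and &&& 1 on Nat match Python
-- on nonnegative ints).
def pyShiftLoop : Nat → Nat → Nat
  | 0, count => count
  | m+1, count => pyShiftLoop ((m+1) >>> 1) (count + ((m+1) &&& 1))
decreasing_by
  simpa [Nat.shiftRight_one] using Nat.div_lt_self (Nat.succ_pos m) (by norm_num)

def is_odious_number_bitwise (n : Int) : Bool :=
  -- if n < 0: n = abs(n)
  let m : Nat := if n < 0 then (-n).toNat else n.toNat
  decide (pyShiftLoop m 0 % 2 = 1)

-- ===== PORT B =====
-- n.bit_length() for a nonnegative integer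
def pyBitLength : Nat → Nat
  | 0 => 0
  | m+1 => pyBitLength ((m+1) / 2) + 1
decreasing_by
  exact Nat.div_lt_self (Nat.succ_pos m) one_lt_two

-- B's while loop: h = (w+1)//2; n = (n >> h) ^ (n & ((1 << h) - 1)); w = h
def pyFoldLoop (n w : Nat) : Nat :=
  if w ≤ 1 then n
  else pyFoldLoop ((n >>> ((w+1)/2)) ^^^ (n &&& ((1 <<< ((w+1)/2)) - 1))) ((w+1)/2)
termination_by w
decreasing_by
  omega

def is_odious_number_bitwise_alt (n : Int) : Bool :=
  -- n = abs(n); fold until one bit remains; return n == 1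
  let m : Nat := n.natAbs
  decide (pyFoldLoop m (pyBitLength m) = 1)

-- ===== PRECONDITION & SPEC =====
def Spec_is_odious_number_bitwise (n : Int) (out : Bool) : Prop := out = is_odious_number_bitwise_alt n
instance (n : Int) (out : Bool) : Decidable (Spec_is_odious_number_bitwise n out) := by unfold Spec_is_odious_number_bitwise; infer_instance

-- ===== CLAIM (what is proved, stated in full; the proofs are below) =====
def Claim_equal_is_odious_number_bitwise : Prop := ∀ (n : Int), Dom_is_odious_number_bitwise n → Spec_is_odious_number_bitwise n (is_odious_number_bitwise n)

-- ===== LEMMAS AND PROOFS =====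

-- the popcount, as a pure function of the number
def cnt : Nat → Nat
  | 0 => 0
  | m+1 => (m+1) % 2 + cnt ((m+1) / 2)
decreasing_by
  exact Nat.div_lt_self (Nat.succ_pos m) one_lt_two

lemma cnt_rec (n : Nat) : cnt n = n % 2 + cnt (n / 2) := by
  cases n with
  | zero => simp [cnt]
  | succ m => rw [cnt]

-- A's loop accumulates the popcount
lemma pyShiftLoop_eq (n : Nat) : ∀ c, pyShiftLoop n c = c + cnt n := by
  induction n using Nat.strong_induction_on with
  | _ n ih =>
    intro c
    cases n with
    | zero => simp [pyShiftLoop, cnt]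
    | succ m =>
      rw [pyShiftLoop, ih ((m+1) >>> 1) (by
        simpa [Nat.shiftRight_one] using Nat.div_lt_self (Nat.succ_pos m) one_lt_two)]
      rw [cnt]
      simp [Nat.shiftRight_one, Nat.and_one_is_mod]
      omega

-- popcount splits at any cut point h
lemma cnt_split (h : Nat) : ∀ n, cnt n = cnt (n / 2 ^ h) + cnt (n % 2 ^ h) := by
  induction h with
  | zero => intro n; rw [pow_zero, Nat.div_one, Nat.mod_one]; simp [cnt]
  | succ h ih =>
    intro n
    rw [cnt_rec n, ih (n / 2)]
    have e1 : n / 2 ^ (h+1) = n / 2 / 2 ^ h := by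
      rw [Nat.div_div_eq_div_mul, pow_succ, mul_comm]
    have e2 : cnt (n % 2 ^ (h+1)) = n % 2 + cnt (n / 2 % 2 ^ h) := by
      rw [cnt_rec (n % 2 ^ (h+1))]
      have d1 : n % 2 ^ (h+1) % 2 = n % 2 :=
        Nat.mod_mod_of_dvd n (dvd_pow_self 2 (Nat.succ_ne_zero h))
      have d2 : n % 2 ^ (h+1) / 2 = n / 2 % 2 ^ h := by
        have : (2 : Nat) ^ (h+1) = 2 * 2 ^ h := by ring
        rw [this, Nat.mod_mul_right_div_self]
      rw [d1, d2]
    rw [e1, e2]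
    omega

-- popcount parity is additive under xor
lemma cnt_xor (a : Nat) : ∀ b, cnt (a ^^^ b) % 2 = (cnt a + cnt b) % 2 := by
  induction a using Nat.strong_induction_on with
  | _ a ih =>
    intro b
    rcases Nat.eq_zero_or_pos a with ha | ha
    · subst ha; simp [cnt]
    · rw [cnt_rec (a ^^^ b), cnt_rec a, cnt_rec b,
        Nat.xor_mod_two_eq, Nat.xor_div_two]
      have := ih (a / 2) (Nat.div_lt_self ha one_lt_two) (b / 2)
      omega

lemma bitLength_lt (n : Nat) : n < 2 ^ pyBitLength n := by
  induction n using Nat.strong_induction_on with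
  | _ n ih =>
    cases n with
    | zero => simp [pyBitLength]
    | succ m =>
      rw [pyBitLength]
      have h := ih ((m+1)/2) (Nat.div_lt_self (Nat.succ_pos m) one_lt_two)
      rw [pow_succ]
      omega

-- B's fold loop computes the popcount's parity
lemma pyFoldLoop_eq (w : Nat) : ∀ n, n < 2 ^ w → pyFoldLoop n w = cnt n % 2 := by
  induction w using Nat.strong_induction_on with
  | _ w ih =>
    intro n hn
    by_cases hw : w ≤ 1
    · rw [pyFoldLoop, if_pos hw]
      have h2 : (2 : Nat) ^ w ≤ 2 := by interval_cases w <;> norm_num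
      have hn2 : n < 2 := lt_of_lt_of_le hn h2
      interval_cases n
      · simp [cnt]
      · simp [cnt]
    · rw [pyFoldLoop, if_neg hw]
      set h := (w+1)/2 with hh
      have hpos : 0 < (2 : Nat) ^ h := Nat.two_pow_pos h
      have hwle : w ≤ h + h := by omega
      have hxa : n / 2 ^ h < 2 ^ h := by
        rw [Nat.div_lt_iff_lt_mul hpos, ← pow_add]
        exact lt_of_lt_of_le hn (Nat.pow_le_pow_right (by norm_num) hwle)
      have hxb : n % 2 ^ h < 2 ^ h := Nat.mod_lt n hpos
      rw [Nat.shiftRight_eq_div_pow, Nat.one_shiftLeft, Nat.and_two_pow_sub_one_eq_mod]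
      rw [ih h (by omega) _ (Nat.xor_lt_two_pow hxa hxb)]
      rw [cnt_xor, cnt_split h n]

-- both abs-folds produce the same natural number
lemma abs_eq_natAbs (n : Int) : (if n < 0 then (-n).toNat else n.toNat) = n.natAbs := by
  split_ifs <;> omega

lemma ports_agree (m : Nat) :
    decide (pyShiftLoop m 0 % 2 = 1) = decide (pyFoldLoop m (pyBitLength m) = 1) := by
  rw [pyShiftLoop_eq, pyFoldLoop_eq _ _ (bitLength_lt _)]
  simp

-- ===== VERDICT (by name: the statement is the Claim_ definition above) =====
theorem is_odious_number_bitwise_spec : Claim_equal_is_odious_number_bitwise := by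
  intro n _
  unfold Spec_is_odious_number_bitwise is_odious_number_bitwise is_odious_number_bitwise_alt
  simp only [abs_eq_natAbs]
  exact ports_agree n.natAbs
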